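-- pv_equiv track=rewrite | github.com/mijung-oh/Algo_python | Algo_programmers/2021카카오_신규아이디추천.py | deleteStartAndEnd
-- ===== SOURCE A (Python) =====
-- def deleteStartAndEnd(id):
--     stack = []
--     ## 처음이 마침표인 경우
--     for w in id:
--         if not stack and w == ".":
--             continue
--         stack.append(w)
--     ## 마지막이 마침표인 경우
--     while stack and stack[-1] == ".":
--         stack.pop()
--     return "".join(stack)
-- ===== SOURCE B (Python) =====
-- def deleteStartAndEnd(id):
--     return id.strip(".")
-- ===== Notes on version B (the rewrite author's own statement) =====
-- stated objective: idiomatic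
-- what changed: Replaces the stack built by a skip-leading-dots loop plus a trailing pop-loop with a single str.strip call on the dot character, done in C by the runtime.
import Mathlib
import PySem

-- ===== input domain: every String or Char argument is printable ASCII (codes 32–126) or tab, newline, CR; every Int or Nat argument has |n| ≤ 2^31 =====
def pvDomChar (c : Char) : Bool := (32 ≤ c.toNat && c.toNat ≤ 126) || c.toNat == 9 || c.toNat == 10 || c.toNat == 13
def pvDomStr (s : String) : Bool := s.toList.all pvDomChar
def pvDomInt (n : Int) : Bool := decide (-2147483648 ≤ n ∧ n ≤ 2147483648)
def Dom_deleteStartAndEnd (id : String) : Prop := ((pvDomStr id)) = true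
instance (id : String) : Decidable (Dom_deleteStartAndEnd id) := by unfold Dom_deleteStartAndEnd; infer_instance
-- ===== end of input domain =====

-- B replaces A's skip-leading-dots stack loop and trailing pop-loop with a single id.strip(".") call (idiomatic, same cost).


-- ===== PORT A =====
-- while stack and stack[-1] == ".": stack.pop()
def pvPopEnd (stack : List Char) : List Char :=
  if hcond : stack ≠ [] ∧ stack.getLast? = some '.' then
    pvPopEnd stack.dropLast
  else stack
termination_by stack.length
decreasing_by
  have : stack.length ≠ 0 := by simpa [List.length_eq_zero_iff] using hcond.1
  simp [List.length_dropLast]; omega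

def deleteStartAndEnd (id : String) : String :=
  -- for w in id: if not stack and w == ".": continue; stack.append(w)
  let stack := id.toList.foldl
    (fun stack w => if stack = [] ∧ w = '.' then stack else stack ++ [w]) []
  -- "".join(stack) on a list of characters is String.ofList (exact)
  String.ofList (pvPopEnd stack)

-- ===== PORT B =====
def deleteStartAndEnd_alt (id : String) : String :=
  PySem.Str.stripChars id "."

-- ===== PRECONDITION & SPEC =====
def Spec_deleteStartAndEnd (id : String) (out : String) : Prop := out = deleteStartAndEnd_alt id
instance (id : String) (out : String) : Decidable (Spec_deleteStartAndEnd id out) := by unfold Spec_deleteStartAndEnd; infer_instance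

-- ===== CLAIM (what is proved, stated in full; the proofs are below) =====
def Claim_equal_deleteStartAndEnd : Prop := ∀ (id : String), Dom_deleteStartAndEnd id → Spec_deleteStartAndEnd id (deleteStartAndEnd id)

-- ===== LEMMAS AND PROOFS =====

lemma pvFold_ne (l acc : List Char) (h : acc ≠ []) :
    l.foldl (fun stack w => if stack = [] ∧ w = '.' then stack else stack ++ [w]) acc
      = acc ++ l := by
  induction l generalizing acc with
  | nil => simp
  | cons c l ih =>
      simp only [List.foldl_cons]
      rw [if_neg (by simp [h]), ih _ (by simp)]
      simp

lemma pvFold_nil (l : List Char) :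
    l.foldl (fun stack w => if stack = [] ∧ w = '.' then stack else stack ++ [w]) []
      = l.dropWhile (fun c => c == '.') := by
  induction l with
  | nil => simp
  | cons c l ih =>
      by_cases hc : c = '.'
      · simpa [hc, List.dropWhile_cons] using ih
      · simp only [List.foldl_cons, List.dropWhile_cons]
        rw [if_neg (by simp [hc]), List.nil_append, pvFold_ne _ _ (by simp)]
        simp [hc]

lemma pvPopEnd_eq (s : List Char) :
    pvPopEnd s = (s.reverse.dropWhile (fun c => c == '.')).reverse := by
  induction s using pvPopEnd.induct with
  | case1 s h ih =>
      obtain ⟨hne, hlast⟩ := h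
      rw [pvPopEnd, dif_pos ⟨hne, hlast⟩, ih]
      have : s.reverse = '.' :: s.dropLast.reverse := by
        conv_lhs => rw [← List.dropLast_concat_getLast hne]
        rw [List.reverse_append]
        have hl : s.getLast hne = '.' := by
          rw [List.getLast?_eq_some_getLast hne] at hlast
          exact Option.some.inj hlast
        simp [hl]
      rw [this, List.dropWhile_cons]
      simp
  | case2 s h =>
      rw [pvPopEnd, dif_neg h]
      rcases List.eq_nil_or_concat s with rfl | ⟨t, c, rfl⟩
      · simp
      · have hc : ¬ (c == '.') = true := by
          intro hcc
          exact h ⟨by simp, by simp [(by simpa using hcc : c = '.')]⟩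
        simp [hc]

-- ===== VERDICT (by name: the statement is the Claim_ definition above) =====
theorem deleteStartAndEnd_spec : Claim_equal_deleteStartAndEnd := by
  intro id _
  unfold Spec_deleteStartAndEnd deleteStartAndEnd deleteStartAndEnd_alt
  rw [PySem.Str.stripChars, PySem.Chars.stripChars]
  simp only [pvFold_nil, pvPopEnd_eq]
  congr 1
  have h1 : ".".toList = ['.'] := by decide
  have h2 : (fun c : Char => (['.'] : List Char).contains c) = (fun c : Char => c == '.') := by
    funext c; by_cases h : c = '.' <;> simp [h]
  rw [h1, h2]
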